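-- pv_equiv track=rewrite | github.com/rrwt/daily-coding-challenge | daily_problems/problem_201_to_300/259.py | ghost
-- ===== SOURCE A (Python) =====
-- from collections import defaultdict
-- from typing import List
--
-- def ghost(words: List[str]) -> List[str]:
--     word_dict = defaultdict(list)
--
--     for word in words:
--         word_dict[word[0]].append(word)
--
--     winning_starts = []
--
--     for first_char, word_list in word_dict.items():
--         if all((len(word) % 2 == 0 for word in word_list)):
--             winning_starts.append(first_char)
--
--     return winning_starts
-- ===== SOURCE B (Python) =====
-- from typing import List
--
-- def ghost(words: List[str]) -> List[str]:
--     # One pass: per first character keep only a running "all lengths even" flag.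
--     flags = {}
--     for word in words:
--         c = word[0]
--         even = len(word) % 2 == 0
--         flags[c] = flags.get(c, True) and even
--     return [c for c, ok in flags.items() if ok]
-- ===== Notes on version B (the rewrite author's own statement) =====
-- stated objective: simpler
-- what changed: Single pass keeping one boolean flag per first character instead of grouping all words into per-character lists and scanning the groups in a second pass.
import Mathlib
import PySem

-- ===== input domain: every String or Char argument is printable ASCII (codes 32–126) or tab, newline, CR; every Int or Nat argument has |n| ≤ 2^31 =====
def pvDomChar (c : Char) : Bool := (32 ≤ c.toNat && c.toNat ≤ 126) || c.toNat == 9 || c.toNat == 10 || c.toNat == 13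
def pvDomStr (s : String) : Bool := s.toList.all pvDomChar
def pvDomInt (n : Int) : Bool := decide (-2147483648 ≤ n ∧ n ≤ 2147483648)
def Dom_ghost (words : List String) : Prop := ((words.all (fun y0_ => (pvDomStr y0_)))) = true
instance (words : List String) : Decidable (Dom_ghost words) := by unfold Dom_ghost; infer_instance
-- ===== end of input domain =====

-- B replaces A's two passes (group all words per first char, then scan each group)
-- by one pass keeping a single running "all lengths even" Bool per first character.

-- word[0]: Pre_ghost excludes empty words, where Python raises IndexError (pyGet? = none)
def ghostKey (w : String) : Char := (PySem.List.pyGet? w.toList 0).getD ' '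

-- len(word) % 2 == 0
def ghostEven (w : String) : Bool := PySem.Str.len w % 2 == 0

-- ===== PORT A =====
def ghost (words : List String) : List String :=
  let word_dict : PySem.Dict Char (List String) :=
    words.foldl (fun d w => d.modify (ghostKey w) [] (· ++ [w])) PySem.Dict.empty
  word_dict.items.foldl
    (fun acc p => if p.2.all ghostEven then acc ++ [String.ofList [p.1]] else acc) []

-- ===== PORT B =====
def ghost_alt (words : List String) : List String :=
  let flags : PySem.Dict Char Bool :=
    words.foldl (fun d w => d.insert (ghostKey w) (d.getD (ghostKey w) true && ghostEven w))
      PySem.Dict.empty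
  (flags.items.filter (fun p => p.2)).map (fun p => String.ofList [p.1])

-- ===== PRECONDITION & SPEC =====
-- Pre_ excludes lists containing the empty string, on which Python's word[0] raises IndexError.
def Pre_ghost (words : List String) : Prop := ∀ w ∈ words, w.toList ≠ []
instance (words : List String) : Decidable (Pre_ghost words) := by unfold Pre_ghost; infer_instance
def pvWitness_ghost : List String := ["ab", "c", "ax"]

def Spec_ghost (words : List String) (out : List String) : Prop := out = ghost_alt words
instance (words : List String) (out : List String) : Decidable (Spec_ghost words out) := by unfold Spec_ghost; infer_instance

-- ===== CLAIM (what is proved, stated in full; the proofs are below) =====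
def Claim_equal_ghost : Prop := ∀ (words : List String), Dom_ghost words → Pre_ghost words → Spec_ghost words (ghost words)

-- ===== LEMMAS AND PROOFS =====

-- A's grouping dict: the group stored at c is exactly the words whose first char is c
lemma ghost_groupD (words : List String) (c : Char) :
    (words.foldl (fun d w => d.modify (ghostKey w) [] (· ++ [w]))
      (PySem.Dict.empty : PySem.Dict Char (List String))).getD c []
    = words.filter (fun w => ghostKey w == c) := by
  have h : words.foldl (fun d w => d.modify (ghostKey w) [] (· ++ [w]))
      (PySem.Dict.empty : PySem.Dict Char (List String))
      = (words.map (fun w => (ghostKey w, w))).foldl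
          (fun d p => d.modify p.1 [] (· ++ [p.2])) PySem.Dict.empty := by
    rw [List.foldl_map]
  rw [h, PySem.Dict.getD_foldl_modify_append]
  simp [List.filter_map, Function.comp_def]

-- B's flag dict: the flag stored at c is "all words starting with c have even length"
lemma ghost_flagD (words : List String) (d : PySem.Dict Char Bool) (c : Char) :
    (words.foldl (fun d w => d.insert (ghostKey w) (d.getD (ghostKey w) true && ghostEven w)) d).getD c true
    = (d.getD c true && (words.filter (fun w => ghostKey w == c)).all ghostEven) := by
  induction words generalizing d with
  | nil => simp
  | cons w ws ih =>
    simp only [List.foldl_cons, ih, PySem.Dict.getD_insert, List.filter_cons]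
    by_cases hc : c = ghostKey w
    · simp [hc, Bool.and_assoc]
    · have : (ghostKey w == c) = false := by simp [Ne.symm hc]
      simp [if_neg hc, this]

theorem ghost_eq_alt (words : List String) : ghost words = ghost_alt words := by
  simp only [ghost, ghost_alt]
  have hndA : (words.foldl (fun d w => d.modify (ghostKey w) [] (· ++ [w]))
      (PySem.Dict.empty : PySem.Dict Char (List String))).keys.Nodup :=
    PySem.Dict.nodup_keys_foldl_modify_key words ghostKey [] _ PySem.Dict.empty
      (by simp)
  have hndB : (words.foldl (fun d w => d.insert (ghostKey w) (d.getD (ghostKey w) true && ghostEven w))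
      (PySem.Dict.empty : PySem.Dict Char Bool)).keys.Nodup :=
    PySem.Dict.nodup_keys_foldl_insert_key words ghostKey _ PySem.Dict.empty
      (by simp)
  rw [PySem.Dict.items_eq_map_keys _ hndA [], PySem.Dict.items_eq_map_keys _ hndB true]
  rw [PySem.Dict.keys_foldl_modify_key, PySem.Dict.keys_foldl_insert_key]
  rw [List.foldl_map, List.filter_map, List.map_map]
  rw [PySem.List.foldl_append_if (fun k =>
        ((words.foldl (fun d w => d.modify (ghostKey w) [] (· ++ [w]))
          PySem.Dict.empty).getD k []).all ghostEven) (fun k => String.ofList [k])]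
  simp only [List.nil_append, Function.comp_def]
  congr 1
  apply List.filter_congr
  intro k _
  rw [ghost_groupD, ghost_flagD]
  simp

-- ===== VERDICT (by name: the statement is the Claim_ definition above) =====
theorem ghost_spec : Claim_equal_ghost := by
  intro words _ _
  unfold Spec_ghost
  exact ghost_eq_alt words
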